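-- pv_equiv track=rewrite | github.com/SkyCHarris/python_problems | easy/say_hello.py | greet_people
-- ===== SOURCE A (Python) =====
-- def greet_people(names):
--     names_list = []
--     if names == []:
--         return ""
--     elif len(names) == 1:
--         return "Hello " + names[0]
--     else:
--         for name in names:
--             names_list.append(name)
--             names_string = 'Hello' + ''.join(names_list) + ','
--         return names_string
-- ===== SOURCE B (Python) =====
-- def greet_people(names):
--     if names == []:
--         return ""
--     if len(names) == 1:
--         return "Hello " + names[0]
--     return "Hello" + "".join(names) + ","
-- ===== Notes on version B (the rewrite author's own statement) =====
-- stated objective: faster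
-- what changed: Replaced the accumulating loop that rebuilds ''.join(names_list) on every iteration by a single closed-form join of the whole list, keeping both guards.
import Mathlib
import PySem

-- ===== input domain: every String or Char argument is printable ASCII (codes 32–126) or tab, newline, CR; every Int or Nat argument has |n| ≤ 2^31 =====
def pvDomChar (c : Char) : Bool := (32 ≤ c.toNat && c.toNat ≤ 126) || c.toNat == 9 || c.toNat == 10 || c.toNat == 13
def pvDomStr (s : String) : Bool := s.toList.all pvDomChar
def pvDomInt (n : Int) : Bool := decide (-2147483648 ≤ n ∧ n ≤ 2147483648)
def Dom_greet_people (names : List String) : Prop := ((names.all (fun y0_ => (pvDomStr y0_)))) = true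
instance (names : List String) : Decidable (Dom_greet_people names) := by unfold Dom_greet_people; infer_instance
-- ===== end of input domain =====

-- B replaces A's per-iteration rebuild of "".join(names_list) by one closed-form join (objective: faster; measured).
-- ===== PORT A =====
-- Literal port of A: loop appends each name and rebuilds names_string each iteration.
def greet_people (names : List String) : String :=
  if names = [] then ""
  else if names.length = 1 then "Hello " ++ names.headI   -- names[0]; list nonempty here
  else
    (names.foldl (fun (acc : List String × String) name =>
      let l := acc.1 ++ [name]
      (l, "Hello" ++ String.join l ++ ",")) ([], "")).2

-- ===== PORT B =====
-- B: closed form, single join instead of the accumulating loop.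
def greet_people_alt (names : List String) : String :=
  match names with
  | [] => ""
  | [n] => "Hello " ++ n
  | _ => "Hello" ++ String.join names ++ ","

-- ===== PRECONDITION & SPEC =====
def Spec_greet_people (names : List String) (out : String) : Prop := out = greet_people_alt names
instance (names : List String) (out : String) : Decidable (Spec_greet_people names out) := by unfold Spec_greet_people; infer_instance

-- ===== CLAIM (what is proved, stated in full; the proofs are below) =====
def Claim_equal_greet_people : Prop := ∀ (names : List String), Dom_greet_people names → Spec_greet_people names (greet_people names)

-- ===== LEMMAS AND PROOFS =====

-- ===== VERDICT (by name: the statement is the Claim_ definition above) =====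
theorem foldl_snd (names : List String) (l0 : List String) (s0 : String) (h : names ≠ []) :
    (names.foldl (fun (acc : List String × String) name =>
      let l := acc.1 ++ [name]
      (l, "Hello" ++ String.join l ++ ",")) (l0, s0)).2
      = "Hello" ++ String.join (l0 ++ names) ++ "," := by
  induction names generalizing l0 s0 with
  | nil => exact absurd rfl h
  | cons a t ih =>
    cases t with
    | nil => simp [List.foldl]
    | cons b u => simpa [List.foldl, List.append_assoc] using ih (l0 ++ [a]) ("Hello" ++ String.join (l0 ++ [a]) ++ ",") (by simp)

theorem greet_people_spec : Claim_equal_greet_people := by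
  intro names _
  unfold Spec_greet_people greet_people greet_people_alt
  match names with
  | [] => simp
  | [n] => simp
  | a :: b :: u =>
    rw [if_neg (by simp), if_neg (by simp)]
    simpa using foldl_snd (a :: b :: u) [] "" (by simp)
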